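-- pv_equiv track=rewrite | github.com/egoritak/zapret-for-ubuntu | zapret_gui.py | build_nfqws_opt_block
-- ===== SOURCE A (Python) =====
-- def build_nfqws_opt_block(nfq_args: list[str]) -> str:
--     lines: list[str] = []
--     current: list[str] = []
--
--     for arg in nfq_args:
--         current.append(arg)
--         if arg == "--new":
--             lines.append(" ".join(current))
--             current = []
--     if current:
--         lines.append(" ".join(current))
--
--     return "\n".join(lines)
-- ===== SOURCE B (Python) =====
-- def build_nfqws_opt_block(nfq_args: list[str]) -> str:
--     # Pass 1: collect the indices of the '--new' delimiters.
--     boundaries = [i for i, arg in enumerate(nfq_args) if arg == "--new"]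
--     # Pass 2: slice the list into segments at those boundaries.
--     segments = []
--     start = 0
--     for i in boundaries:
--         segments.append(" ".join(nfq_args[start:i + 1]))
--         start = i + 1
--     if start < len(nfq_args):
--         segments.append(" ".join(nfq_args[start:]))
--     return "\n".join(segments)
-- ===== Notes on version B (the rewrite author's own statement) =====
-- stated objective: alternative
-- what changed: Replaces the running 'current' accumulator with two passes: collect the indices of '--new' delimiters, then slice the argument list into segments at those indices.
import Mathlib
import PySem

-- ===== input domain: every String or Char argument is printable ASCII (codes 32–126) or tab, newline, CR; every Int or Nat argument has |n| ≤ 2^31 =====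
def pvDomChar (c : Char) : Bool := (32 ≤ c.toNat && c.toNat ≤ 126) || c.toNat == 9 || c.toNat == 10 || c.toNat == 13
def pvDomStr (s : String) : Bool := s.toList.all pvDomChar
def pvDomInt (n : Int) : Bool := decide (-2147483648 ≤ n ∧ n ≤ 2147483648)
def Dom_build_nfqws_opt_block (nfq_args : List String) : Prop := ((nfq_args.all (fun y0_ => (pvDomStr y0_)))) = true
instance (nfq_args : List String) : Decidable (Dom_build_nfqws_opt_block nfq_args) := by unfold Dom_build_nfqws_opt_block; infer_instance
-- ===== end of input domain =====

-- B splits the list by slicing at precomputed '--new' indices instead of A's running accumulator; alternative decomposition, same cost.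

-- ===== PORT A =====
-- the loop body: append arg to current; on '--new' flush current into lines
def stepA (s : List String × List String) (arg : String) : List String × List String :=
  let current := s.2 ++ [arg]
  if arg == "--new" then (s.1 ++ [PySem.Str.join " " current], ([] : List String))
  else (s.1, current)

def build_nfqws_opt_block (nfq_args : List String) : String :=
  let st := nfq_args.foldl stepA (([] : List String), ([] : List String))
  let lines := if st.2 = ([] : List String) then st.1 else st.1 ++ [PySem.Str.join " " st.2]
  PySem.Str.join "\n" lines

-- ===== PORT B =====
-- pass-2 loop body: slice nfq_args[start:i+1] into a segment, advance start
def stepB (xs : List String) (s : List String × Int) (i : Int) : List String × Int :=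
  (s.1 ++ [PySem.Str.join " " (PySem.List.slice xs (some s.2) (some (i + 1)))], i + 1)

def build_nfqws_opt_block_alt (nfq_args : List String) : String :=
  let boundaries := ((PySem.List.enumerate nfq_args 0).filter (fun p => p.2 == "--new")).map (fun p => p.1)
  let st := boundaries.foldl (stepB nfq_args) (([] : List String), (0 : Int))
  let segments := if st.2 < (nfq_args.length : Int) then
      st.1 ++ [PySem.Str.join " " (PySem.List.slice nfq_args (some st.2) none)]
    else st.1
  PySem.Str.join "\n" segments

-- ===== PRECONDITION & SPEC =====
def Spec_build_nfqws_opt_block (nfq_args : List String) (out : String) : Prop := out = build_nfqws_opt_block_alt nfq_args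
instance (nfq_args : List String) (out : String) : Decidable (Spec_build_nfqws_opt_block nfq_args out) := by unfold Spec_build_nfqws_opt_block; infer_instance

-- ===== CLAIM (what is proved, stated in full; the proofs are below) =====
def Claim_equal_build_nfqws_opt_block : Prop := ∀ (nfq_args : List String), Dom_build_nfqws_opt_block nfq_args → Spec_build_nfqws_opt_block nfq_args (build_nfqws_opt_block nfq_args)

-- ===== LEMMAS AND PROOFS =====

-- folding over the mapped filter equals a guarded fold over the whole list
theorem foldl_map_filter {α β γ : Type} (p : α → Bool) (f : α → β) (g : γ → β → γ) :
    ∀ (l : List α) (s : γ),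
      ((l.filter p).map f).foldl g s = l.foldl (fun s x => if p x then g s (f x) else s) s := by
  intro l
  induction l with
  | nil => intro s; rfl
  | cons a t ih =>
    intro s
    by_cases h : p a = true
    · simp [h, ih]
    · simp [h, ih]

-- main invariant: B's guarded fold over enumerate tracks A's accumulator fold;
-- A's 'current' is always the slice xs[start:k] of the original list
theorem main_inv (xs : List String) :
    ∀ (ys : List String) (k st : Nat) (lines : List String),
      ys = xs.drop k → st ≤ k →
      ∃ st' : Nat, st' ≤ k + ys.length ∧
        (PySem.List.enumerate ys (k : Int)).foldl
            (fun s q => if q.2 == "--new" then stepB xs s q.1 else s) (lines, (st : Int))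
          = ((ys.foldl stepA (lines, (xs.take k).drop st)).1, (st' : Int)) ∧
        (ys.foldl stepA (lines, (xs.take k).drop st)).2 = (xs.take (k + ys.length)).drop st' := by
  intro ys
  induction ys with
  | nil =>
    intro k st lines _ hst
    exact ⟨st, by omega, by simp [PySem.List.enumerate], by simp⟩
  | cons a t ih =>
    intro k st lines hys hst
    have hk : k < xs.length := by
      by_contra h
      rw [List.drop_eq_nil_of_le (by omega)] at hys
      exact (List.cons_ne_nil a t) hys
    have hsplit : xs[k] :: xs.drop (k + 1) = a :: t := by
      rw [List.getElem_cons_drop, ← hys]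
    have ha : xs[k] = a := (List.cons.injEq _ _ _ _ ▸ hsplit).1
    have ht : xs.drop (k + 1) = t := (List.cons.injEq _ _ _ _ ▸ hsplit).2
    have hcur : (xs.take k).drop st ++ [a] = (xs.take (k + 1)).drop st := by
      rw [List.take_add_one, List.getElem?_eq_getElem hk, ha]
      rw [List.drop_append_of_le_length (by simp; omega)]
      rfl
    rw [PySem.List.enumerate_cons]
    by_cases h : (a == "--new") = true
    · have hslice : PySem.List.slice xs (some (st : Int)) (some ((k : Int) + 1)) =
          (xs.take (k + 1)).drop st := by
        have : ((k : Int) + 1) = ((k + 1 : Nat) : Int) := by push_cast; ring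
        rw [this, PySem.List.slice_natCast, List.drop_take]
      have hempty : (xs.take (k + 1)).drop (k + 1) = [] := by
        apply List.drop_eq_nil_of_le; simp
      obtain ⟨st', h1, h2, h3⟩ := ih (k + 1) (k + 1)
        (lines ++ [PySem.Str.join " " ((xs.take k).drop st ++ [a])]) ht.symm (le_refl _)
      refine ⟨st', by simp only [List.length_cons]; omega, ?_, ?_⟩
      · rw [List.foldl_cons, List.foldl_cons]
        simp only [h, if_pos]
        rw [show stepA (lines, (xs.take k).drop st) a =
            (lines ++ [PySem.Str.join " " ((xs.take k).drop st ++ [a])], []) by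
          simp [stepA, h]]
        rw [show stepB xs (lines, (st : Int)) (k : Int) =
            (lines ++ [PySem.Str.join " " ((xs.take k).drop st ++ [a])], (k : Int) + 1) by
          simp [stepB, hslice, hcur]]
        rw [show ((k : Int) + 1) = ((k + 1 : Nat) : Int) by push_cast; ring]
        rw [← hempty] at h2
        convert h2 using 3 <;> simp [hempty]
      · rw [List.foldl_cons]
        rw [show stepA (lines, (xs.take k).drop st) a =
            (lines ++ [PySem.Str.join " " ((xs.take k).drop st ++ [a])], []) by
          simp [stepA, h]]
        rw [← hempty] at h3
        have := h3
        rw [hempty] at this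
        convert this using 3 <;> (simp only [List.length_cons]; omega)
    · obtain ⟨st', h1, h2, h3⟩ := ih (k + 1) st lines ht.symm (by omega)
      refine ⟨st', by simp only [List.length_cons]; omega, ?_, ?_⟩
      · rw [List.foldl_cons, List.foldl_cons]
        simp only [h, if_neg, Bool.false_eq_true, not_false_iff]
        rw [show stepA (lines, (xs.take k).drop st) a = (lines, (xs.take k).drop st ++ [a]) by
          simp [stepA, h]]
        rw [hcur, show ((k : Int) + 1) = ((k + 1 : Nat) : Int) by push_cast; ring]
        exact h2
      · rw [List.foldl_cons]
        rw [show stepA (lines, (xs.take k).drop st) a = (lines, (xs.take k).drop st ++ [a]) by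
          simp [stepA, h]]
        rw [hcur]
        have := h3
        convert this using 3 <;> (simp only [List.length_cons]; omega)

-- ===== VERDICT (by name: the statement is the Claim_ definition above) =====
theorem build_nfqws_opt_block_spec : Claim_equal_build_nfqws_opt_block := by
  intro xs _
  unfold Spec_build_nfqws_opt_block build_nfqws_opt_block build_nfqws_opt_block_alt
  show PySem.Str.join "\n"
      (if (xs.foldl stepA (([] : List String), ([] : List String))).2 = ([] : List String)
       then (xs.foldl stepA (([] : List String), ([] : List String))).1
       else (xs.foldl stepA (([] : List String), ([] : List String))).1
            ++ [PySem.Str.join " " (xs.foldl stepA (([] : List String), ([] : List String))).2])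
    = PySem.Str.join "\n"
      (if ((((PySem.List.enumerate xs 0).filter (fun p => p.2 == "--new")).map (fun p => p.1)).foldl (stepB xs) (([] : List String), (0 : Int))).2 < (xs.length : Int)
       then ((((PySem.List.enumerate xs 0).filter (fun p => p.2 == "--new")).map (fun p => p.1)).foldl (stepB xs) (([] : List String), (0 : Int))).1
            ++ [PySem.Str.join " " (PySem.List.slice xs (some ((((PySem.List.enumerate xs 0).filter (fun p => p.2 == "--new")).map (fun p => p.1)).foldl (stepB xs) (([] : List String), (0 : Int))).2) none)]
       else ((((PySem.List.enumerate xs 0).filter (fun p => p.2 == "--new")).map (fun p => p.1)).foldl (stepB xs) (([] : List String), (0 : Int))).1)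
  obtain ⟨st', hle, h2, h3⟩ := main_inv xs xs 0 0 [] (by simp) (le_refl 0)
  simp only [List.take_zero, List.drop_nil, Nat.cast_zero, Nat.zero_add, List.take_length] at h2 h3
  rw [foldl_map_filter, h2]
  dsimp only
  by_cases hlt : st' < xs.length
  · rw [if_neg (show ¬ (List.foldl stepA ([], []) xs).2 = [] by
        rw [h3, List.drop_eq_nil_iff]; omega),
      if_pos (show (st' : Int) < (xs.length : Int) by exact_mod_cast hlt),
      h3, PySem.List.slice_from_natCast]
  · rw [if_pos (show (List.foldl stepA ([], []) xs).2 = [] by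
        rw [h3, List.drop_eq_nil_iff]; omega),
      if_neg (show ¬ (st' : Int) < (xs.length : Int) by exact_mod_cast hlt)]
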